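-- pv_equiv track=rewrite | github.com/OverKrice3000/EFPythonTasks | maxMinProduct/main.py | compute_grouped_by_pow_partition
-- ===== SOURCE A (Python) =====
-- from typing import Literal, Union, Tuple, List, Any
--
-- PowTuple = Tuple[int, int]
--
-- def compute_grouped_by_pow_partition(partition: List[PowTuple], group_pow: int) -> Tuple[
--     List[PowTuple], List[PowTuple]]:
--     greater_pow = []
--     equal_pow = []
--     less_pow = []
--     for i in partition:
--         if i[1] > group_pow:
--             greater_pow.append(i)
--         elif i[1] == group_pow:
--             equal_pow.append(i)
--         else:
--             less_pow.append(i)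
--
--     pending_partition = []
--     determined_partition = []
--
--     pending_partition.extend(less_pow)
--     determined_partition_base = 1
--     for i in equal_pow:
--         determined_partition_base *= i[0]
--     for i in greater_pow:
--         pow_remainder = i[1] % group_pow
--         pow_quotient = int((i[1] - pow_remainder) / group_pow)
--         determined_partition_base *= pow(i[0], pow_quotient)
--         if pow_remainder != 0:
--             pending_partition.append((i[0], pow_remainder))
--     determined_partition.append((determined_partition_base, group_pow))
--     return determined_partition, pending_partition
-- ===== SOURCE B (Python) =====
-- def _solve(part, group_pow):
--     # divide and conquer: returns (base_product, less_list, remainder_list)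
--     n = len(part)
--     if n == 0:
--         return 1, [], []
--     if n == 1:
--         x, p = part[0]
--         if p < group_pow:
--             return 1, [part[0]], []
--         if p == group_pow:
--             return x, [], []
--         rem = p % group_pow
--         quot = int((p - rem) / group_pow)
--         return pow(x, quot), [], ([(x, rem)] if rem != 0 else [])
--     mid = n // 2
--     b1, l1, r1 = _solve(part[:mid], group_pow)
--     b2, l2, r2 = _solve(part[mid:], group_pow)
--     return b1 * b2, l1 + l2, r1 + r2
--
-- def compute_grouped_by_pow_partition(partition, group_pow):
--     base, less_list, remainder_list = _solve(partition, group_pow)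
--     return [(base, group_pow)], less_list + remainder_list
-- ===== Notes on version B (the rewrite author's own statement) =====
-- stated objective: alternative
-- what changed: Replaces A's staged scheme (a classification pass into three bucket lists followed by two aggregation loops over the buckets) with a divide-and-conquer recursion that splits the list in half, solves each half into (base product, less list, remainder list) and merges the two results.
-- outside the precondition, e.g. on compute_grouped_by_pow_partition([(2, 3)], -2): A returns ([(0.25, -2)], [(2, -1)]), B returns ([(0.25, -2)], [(2, -1)]); on compute_grouped_by_pow_partition([(2, 3)], 0): A raises ZeroDivisionError, B raises ZeroDivisionError
import Mathlib
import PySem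

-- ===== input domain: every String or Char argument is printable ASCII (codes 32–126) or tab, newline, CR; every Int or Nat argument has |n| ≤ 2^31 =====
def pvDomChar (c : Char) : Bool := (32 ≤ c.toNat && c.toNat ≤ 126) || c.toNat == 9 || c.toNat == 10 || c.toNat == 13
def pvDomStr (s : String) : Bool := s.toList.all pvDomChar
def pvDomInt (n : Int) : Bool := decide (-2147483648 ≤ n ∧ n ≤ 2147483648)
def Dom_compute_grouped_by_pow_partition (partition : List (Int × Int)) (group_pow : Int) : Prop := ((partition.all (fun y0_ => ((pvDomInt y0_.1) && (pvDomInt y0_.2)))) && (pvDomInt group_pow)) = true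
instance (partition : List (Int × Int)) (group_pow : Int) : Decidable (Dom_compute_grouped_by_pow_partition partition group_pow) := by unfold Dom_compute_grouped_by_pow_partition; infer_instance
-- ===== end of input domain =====

-- B replaces A's staged scheme (classify into three bucket lists, then aggregate the buckets
-- in two more loops) by a divide-and-conquer recursion that splits the list in half and
-- combines the halves' (base, less, remainder) results (objective: alternative).


-- ===== PORT A =====
-- Literal transliteration of A: classification loop into (greater, equal, less),
-- then the base loop over equal, then the loop over greater.
-- Inside Pre_ the Python `int((i[1] - rem) / group_pow)` is an exact division of ints
-- whose magnitudes keep the float division exact, so it equals PySem.Int.floordiv here;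
-- likewise `pow(i[0], quot)` has quot ≥ 0 inside Pre_, so it is `i.1 ^ quot.toNat`.
def compute_grouped_by_pow_partition (partition : List (Int × Int)) (group_pow : Int) : (List (Int × Int)) × (List (Int × Int)) :=
  let cls := partition.foldl (fun (s : List (Int × Int) × List (Int × Int) × List (Int × Int)) i =>
      if group_pow < i.2 then (s.1 ++ [i], s.2.1, s.2.2)
      else if i.2 = group_pow then (s.1, s.2.1 ++ [i], s.2.2)
      else (s.1, s.2.1, s.2.2 ++ [i])) ([], [], [])
  let pending₀ := ([] : List (Int × Int)) ++ cls.2.2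
  let base := cls.2.1.foldl (fun b i => b * i.1) 1
  let res := cls.1.foldl (fun (s : Int × List (Int × Int)) i =>
      let rem := PySem.Int.mod i.2 group_pow
      let quot := PySem.Int.floordiv (i.2 - rem) group_pow
      (s.1 * i.1 ^ quot.toNat, if rem ≠ 0 then s.2 ++ [(i.1, rem)] else s.2)) (base, pending₀)
  ([(res.1, group_pow)], res.2)

-- ===== PORT B =====
-- Literal transliteration of B's divide-and-conquer helper _solve: empty and singleton
-- leaves, otherwise split at n // 2, recurse on both halves and combine.
-- As on the A side, `int((p - rem) / group_pow)` is PySem.Int.floordiv and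
-- `pow(x, quot)` is `x ^ quot.toNat` inside Pre_ (quot ≥ 0, exact division).
def pvSolve (part : List (Int × Int)) (group_pow : Int) : Int × List (Int × Int) × List (Int × Int) :=
  match part with
  | [] => (1, [], [])
  | [i] =>
      if i.2 < group_pow then (1, [i], [])
      else if i.2 = group_pow then (i.1, [], [])
      else
        let rem := PySem.Int.mod i.2 group_pow
        let quot := PySem.Int.floordiv (i.2 - rem) group_pow
        (i.1 ^ quot.toNat, [], if rem ≠ 0 then [(i.1, rem)] else [])
  | a :: b :: rest =>
      let mid := (a :: b :: rest).length / 2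
      let s1 := pvSolve ((a :: b :: rest).take mid) group_pow
      let s2 := pvSolve ((a :: b :: rest).drop mid) group_pow
      (s1.1 * s2.1, s1.2.1 ++ s2.2.1, s1.2.2 ++ s2.2.2)
termination_by part.length
decreasing_by
  · simp [List.length_take]; omega
  · simp; omega

def compute_grouped_by_pow_partition_alt (partition : List (Int × Int)) (group_pow : Int) : (List (Int × Int)) × (List (Int × Int)) :=
  let s := pvSolve partition group_pow
  ([(s.1, group_pow)], s.2.1 ++ s.2.2)

-- ===== PRECONDITION & SPEC =====
-- Pre_ excludes exactly the inputs on which Python A does not return a value of the declared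
-- type: if group_pow ≤ 0 and some element has a power > group_pow, A either raises
-- ZeroDivisionError (group_pow = 0, or base 0 with negative exponent) or produces a float
-- (pow with a negative exponent), never an int pair.
def Pre_compute_grouped_by_pow_partition (partition : List (Int × Int)) (group_pow : Int) : Prop :=
  0 < group_pow ∨ ∀ p ∈ partition, p.2 ≤ 0
instance (partition : List (Int × Int)) (group_pow : Int) : Decidable (Pre_compute_grouped_by_pow_partition partition group_pow) := by unfold Pre_compute_grouped_by_pow_partition; infer_instance
def pvWitness_compute_grouped_by_pow_partition : (List (Int × Int)) × Int := ([(2, 7), (3, 3), (4, 1), (5, -2)], 3)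

def Spec_compute_grouped_by_pow_partition (partition : List (Int × Int)) (group_pow : Int) (out : (List (Int × Int)) × (List (Int × Int))) : Prop := out = compute_grouped_by_pow_partition_alt partition group_pow
instance (partition : List (Int × Int)) (group_pow : Int) (out : (List (Int × Int)) × (List (Int × Int))) : Decidable (Spec_compute_grouped_by_pow_partition partition group_pow out) := by unfold Spec_compute_grouped_by_pow_partition; infer_instance

-- ===== CLAIM (what is proved, stated in full; the proofs are below) =====
def Claim_equal_compute_grouped_by_pow_partition : Prop := ∀ (partition : List (Int × Int)) (group_pow : Int), Dom_compute_grouped_by_pow_partition partition group_pow → Pre_compute_grouped_by_pow_partition partition group_pow → Spec_compute_grouped_by_pow_partition partition group_pow (compute_grouped_by_pow_partition partition group_pow)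

-- ===== LEMMAS AND PROOFS =====

-- The per-element contribution to the base product.
def pvTerm (gp : Int) (i : Int × Int) : Int :=
  if i.2 < gp then 1
  else if i.2 = gp then i.1
  else i.1 ^ (PySem.Int.floordiv (i.2 - PySem.Int.mod i.2 gp) gp).toNat

-- The per-element contribution to the remainder list.
def pvRem (gp : Int) (i : Int × Int) : List (Int × Int) :=
  if i.2 < gp ∨ i.2 = gp then []
  else if PySem.Int.mod i.2 gp = 0 then [] else [(i.1, PySem.Int.mod i.2 gp)]

-- Characterisation of B's divide-and-conquer: it computes the elementwise product,
-- the less-filter and the remainder flatMap, for any split.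
theorem pv_solve_eq (part : List (Int × Int)) (gp : Int) :
    pvSolve part gp
      = ((part.map (pvTerm gp)).prod,
         part.filter (fun i => decide (i.2 < gp)),
         part.flatMap (pvRem gp)) := by
  fun_induction pvSolve part gp
  · simp
  · rename_i i h
    simp [pvTerm, pvRem, h]
  · rename_i i h h2
    have h1 : ¬ i.2 < gp := by omega
    simp [pvTerm, pvRem, h1, h2]
  · rename_i i h1 h2 rem quot
    have h3 : ¬ (i.2 < gp ∨ i.2 = gp) := fun hc => hc.elim h1 h2
    by_cases hm : PySem.Int.mod i.2 gp = 0 <;>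
      simp [pvTerm, pvRem, rem, quot, h1, h2, h3, hm]
  · rename_i a b rest mid s1 s2 ihT ihD
    have key := congrArg (fun l => ((l.map (pvTerm gp)).prod,
        l.filter (fun i => decide (i.2 < gp)), l.flatMap (pvRem gp)))
      (List.take_append_drop mid (a :: b :: rest))
    simp only [List.map_append, List.prod_append, List.filter_append,
      List.flatMap_append] at key
    simp only [s1, s2, ihT, ihD]
    exact key

theorem pv_cls_fold (gp : Int) (xs : List (Int × Int)) :
    ∀ (g e l : List (Int × Int)),
    xs.foldl (fun (s : List (Int × Int) × List (Int × Int) × List (Int × Int)) i =>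
      if gp < i.2 then (s.1 ++ [i], s.2.1, s.2.2)
      else if i.2 = gp then (s.1, s.2.1 ++ [i], s.2.2)
      else (s.1, s.2.1, s.2.2 ++ [i])) (g, e, l)
    = (g ++ xs.filter (fun i => decide (gp < i.2)),
       e ++ xs.filter (fun i => decide (i.2 = gp)),
       l ++ xs.filter (fun i => decide (i.2 < gp))) := by
  induction xs with
  | nil => simp
  | cons x xs ih =>
    intro g e l
    rcases lt_trichotomy x.2 gp with h | h | h
    · have h1 : ¬ gp < x.2 := by omega
      have h2 : x.2 ≠ gp := by omega
      simp [List.foldl_cons, h, h1, h2, ih, List.filter_cons]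
    · have h1 : ¬ gp < x.2 := by omega
      have h3 : ¬ x.2 < gp := by omega
      simp [List.foldl_cons, h, h1, h3, ih, List.filter_cons]
    · have h2 : x.2 ≠ gp := by omega
      have h3 : ¬ x.2 < gp := by omega
      simp [List.foldl_cons, h, h2, h3, ih, List.filter_cons]

theorem pv_base_fold (xs : List (Int × Int)) : ∀ (b : Int),
    xs.foldl (fun b i => b * i.1) b = b * (xs.map Prod.fst).prod := by
  induction xs with
  | nil => simp
  | cons x xs ih => intro b; simp [List.foldl_cons, ih, mul_assoc]

theorem pv_greater_fold (gp : Int) (xs : List (Int × Int)) : ∀ (b : Int) (P : List (Int × Int)),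
    xs.foldl (fun (s : Int × List (Int × Int)) i =>
      let rem := PySem.Int.mod i.2 gp
      let quot := PySem.Int.floordiv (i.2 - rem) gp
      (s.1 * i.1 ^ quot.toNat, if rem ≠ 0 then s.2 ++ [(i.1, rem)] else s.2)) (b, P)
    = (b * (xs.map (fun i => i.1 ^ (PySem.Int.floordiv (i.2 - PySem.Int.mod i.2 gp) gp).toNat)).prod,
       P ++ xs.flatMap (fun i => if PySem.Int.mod i.2 gp = 0 then [] else [(i.1, PySem.Int.mod i.2 gp)])) := by
  induction xs with
  | nil => simp
  | cons x xs ih =>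
    intro b P
    by_cases hm : PySem.Int.mod x.2 gp = 0
    · have hs : (let rem := PySem.Int.mod x.2 gp
          let quot := PySem.Int.floordiv (x.2 - rem) gp
          ((b * x.1 ^ quot.toNat, if rem ≠ 0 then P ++ [(x.1, rem)] else P) : Int × List (Int × Int)))
          = (b * x.1 ^ (PySem.Int.floordiv (x.2 - PySem.Int.mod x.2 gp) gp).toNat, P) := by
        simp [hm]
      rw [List.foldl_cons]; rw [show _ = _ from hs, ih]
      simp [hm, mul_assoc]
    · have hs : (let rem := PySem.Int.mod x.2 gp
          let quot := PySem.Int.floordiv (x.2 - rem) gp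
          ((b * x.1 ^ quot.toNat, if rem ≠ 0 then P ++ [(x.1, rem)] else P) : Int × List (Int × Int)))
          = (b * x.1 ^ (PySem.Int.floordiv (x.2 - PySem.Int.mod x.2 gp) gp).toNat,
             P ++ [(x.1, PySem.Int.mod x.2 gp)]) := by
        simp [hm]
      rw [List.foldl_cons]; rw [show _ = _ from hs, ih]
      simp [hm, mul_assoc, List.append_assoc]

-- On the elements of the greater-filter, pvTerm / pvRem reduce to the loop bodies of A's
-- greater loop; on the other elements pvTerm is 1 / fst and pvRem is [].
theorem pv_prod_split (gp : Int) (xs : List (Int × Int)) :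
    ((xs.filter (fun i => decide (i.2 = gp))).map Prod.fst).prod
      * ((xs.filter (fun i => decide (gp < i.2))).map
          (fun i => i.1 ^ (PySem.Int.floordiv (i.2 - PySem.Int.mod i.2 gp) gp).toNat)).prod
    = (xs.map (pvTerm gp)).prod := by
  induction xs with
  | nil => simp
  | cons x xs ih =>
    rcases lt_trichotomy x.2 gp with h | h | h
    · have h1 : ¬ gp < x.2 := by omega
      have h2 : x.2 ≠ gp := by omega
      simp [List.filter_cons, h, h1, h2, ih, pvTerm]
    · have h1 : ¬ gp < x.2 := by omega
      have h3 : ¬ x.2 < gp := by omega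
      simp [List.filter_cons, h, h1, h3, pvTerm, mul_assoc, mul_left_comm, mul_comm, ← ih]
    · have h2 : x.2 ≠ gp := by omega
      have h3 : ¬ x.2 < gp := by omega
      simp [List.filter_cons, h, h2, h3, pvTerm, mul_assoc, mul_left_comm, mul_comm, ← ih]

theorem pv_rem_split (gp : Int) (xs : List (Int × Int)) :
    (xs.filter (fun i => decide (gp < i.2))).flatMap
        (fun i => if PySem.Int.mod i.2 gp = 0 then [] else [(i.1, PySem.Int.mod i.2 gp)])
    = xs.flatMap (pvRem gp) := by
  induction xs with
  | nil => simp
  | cons x xs ih =>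
    rcases lt_trichotomy x.2 gp with h | h | h
    · have h1 : ¬ gp < x.2 := by omega
      simp [List.filter_cons, h1, ih, pvRem, h]
    · have h1 : ¬ gp < x.2 := by omega
      simp [List.filter_cons, h1, ih, pvRem, h]
    · have h2 : ¬ (x.2 < gp ∨ x.2 = gp) := by omega
      simp [List.filter_cons, h, ih, pvRem, h2]

-- ===== VERDICT (by name: the statement is the Claim_ definition above) =====
theorem compute_grouped_by_pow_partition_spec : Claim_equal_compute_grouped_by_pow_partition := by
  intro partition group_pow _ _
  unfold Spec_compute_grouped_by_pow_partition
  unfold compute_grouped_by_pow_partition compute_grouped_by_pow_partition_alt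
  simp only [pv_cls_fold, pv_base_fold, pv_greater_fold, pv_solve_eq, List.nil_append, one_mul]
  refine Prod.ext ?_ ?_
  · simp [pv_prod_split]
  · simp [pv_rem_split]
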